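-- pv_equiv track=rewrite | github.com/lhyphendixon/sidekick-forge | app/services/lore_import_service.py | merge_signal_lists
-- ===== SOURCE A (Python) =====
-- from typing import Any, Dict, List, Optional, Tuple
--
-- LORE_CATEGORIES = [
--     "identity",
--     "roles_and_responsibilities",
--     "current_projects",
--     "team_and_relationships",
--     "tools_and_systems",
--     "communication_style",
--     "goals_and_priorities",
--     "preferences_and_constraints",
--     "domain_knowledge",
--     "decision_log",
-- ]
--
-- def merge_signal_lists(all_signals: List[Dict[str, List[str]]]) -> Dict[str, List[str]]:
--     """Merge signal lists from multiple chunks, deduplicating."""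
--     merged: Dict[str, List[str]] = {}
--     for signals in all_signals:
--         for category, items in signals.items():
--             if category not in LORE_CATEGORIES:
--                 continue
--             if category not in merged:
--                 merged[category] = []
--             for item in items:
--                 item_lower = item.strip().lower()
--                 if not any(existing.strip().lower() == item_lower for existing in merged[category]):
--                     merged[category].append(item.strip())
--     return merged
-- ===== SOURCE B (Python) =====
-- from typing import Dict, List
--
-- LORE_CATEGORIES = [
--     "identity",
--     "roles_and_responsibilities",
--     "current_projects",
--     "team_and_relationships",
--     "tools_and_systems",
--     "communication_style",
--     "goals_and_priorities",
--     "preferences_and_constraints",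
--     "domain_knowledge",
--     "decision_log",
-- ]
--
--
-- def merge_signal_lists(all_signals: List[Dict[str, List[str]]]) -> Dict[str, List[str]]:
--     """Merge signal lists from multiple chunks, deduplicating."""
--     # Pass 1: aggregate all raw items per known category, in first-seen order.
--     aggregated: Dict[str, List[str]] = {}
--     for signals in all_signals:
--         for category, items in signals.items():
--             if category in LORE_CATEGORIES:
--                 aggregated.setdefault(category, []).extend(items)
--     # Pass 2: dedup each category's list by case-insensitive stripped key,
--     # keeping the first occurrence (stored stripped), via a seen-set.
--     result: Dict[str, List[str]] = {}
--     for category, raw_items in aggregated.items():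
--         seen = set()
--         deduped: List[str] = []
--         for item in raw_items:
--             key = item.strip().lower()
--             if key not in seen:
--                 seen.add(key)
--                 deduped.append(item.strip())
--         result[category] = deduped
--     return result
-- ===== Notes on version B (the rewrite author's own statement) =====
-- stated objective: alternative
-- what changed: B splits A's single loop (which rescans merged[category] with any() for every item) into two passes: first aggregate all raw items per category, then deduplicate each category's list once using a seen-set of case-insensitive stripped keys, removing the inner linear scan.
import Mathlib
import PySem

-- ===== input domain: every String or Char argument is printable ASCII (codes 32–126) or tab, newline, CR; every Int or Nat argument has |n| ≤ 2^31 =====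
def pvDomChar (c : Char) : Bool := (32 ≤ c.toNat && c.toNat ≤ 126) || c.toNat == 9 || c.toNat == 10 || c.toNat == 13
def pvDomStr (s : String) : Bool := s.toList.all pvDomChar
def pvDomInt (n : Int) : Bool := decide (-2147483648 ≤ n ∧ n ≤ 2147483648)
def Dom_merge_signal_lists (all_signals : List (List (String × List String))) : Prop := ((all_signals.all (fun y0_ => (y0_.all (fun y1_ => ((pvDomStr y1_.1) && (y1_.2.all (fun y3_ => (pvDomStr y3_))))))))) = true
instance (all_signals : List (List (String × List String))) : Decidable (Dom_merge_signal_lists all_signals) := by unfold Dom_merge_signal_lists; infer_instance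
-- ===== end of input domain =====

-- B separates A's single inline-scanning loop into two passes — aggregate all raw items
-- per category, then dedup each list once with a seen-set — same return value (objective: alternative).

def LORE_CATEGORIES : List String :=
  ["identity", "roles_and_responsibilities", "current_projects", "team_and_relationships",
   "tools_and_systems", "communication_style", "goals_and_priorities",
   "preferences_and_constraints", "domain_knowledge", "decision_log"]

-- ===== PORT A =====
def merge_signal_lists (all_signals : List (List (String × List String))) : List (String × List String) :=
  (all_signals.foldl
    (fun (merged : PySem.Dict String (List String)) signals =>
      signals.foldl
        (fun (merged : PySem.Dict String (List String)) p =>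
          if p.1 ∈ LORE_CATEGORIES then
            let merged := if merged.contains p.1 then merged else merged.insert p.1 []
            p.2.foldl
              (fun (merged : PySem.Dict String (List String)) item =>
                let item_lower := PySem.Str.lower (PySem.Str.strip item)
                if (merged.getD p.1 []).any
                    (fun existing => PySem.Str.lower (PySem.Str.strip existing) == item_lower) then
                  merged
                else
                  merged.insert p.1 (merged.getD p.1 [] ++ [PySem.Str.strip item]))
              merged
          else merged)
        merged)
    PySem.Dict.empty).items

-- ===== PORT B =====
-- dedup pass of Source B: one fold carrying (seen keys : PySem.Set, output list)
def dedupCI (raw_items : List String) : List String :=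
  (raw_items.foldl
    (fun (st : PySem.Set String × List String) item =>
      let key := PySem.Str.lower (PySem.Str.strip item)
      if PySem.Set.contains st.1 key then st
      else (PySem.Set.add st.1 key, st.2 ++ [PySem.Str.strip item]))
    (PySem.Set.empty, [])).2

def merge_signal_lists_alt (all_signals : List (List (String × List String))) : List (String × List String) :=
  let aggregated : PySem.Dict String (List String) :=
    all_signals.foldl
      (fun agg signals =>
        signals.foldl
          (fun (agg : PySem.Dict String (List String)) p =>
            if p.1 ∈ LORE_CATEGORIES then
              agg.insert p.1 (agg.getD p.1 [] ++ p.2)   -- setdefault(...).extend(items)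
            else agg)
          agg)
      PySem.Dict.empty
  (aggregated.items.foldl
    (fun (result : PySem.Dict String (List String)) p => result.insert p.1 (dedupCI p.2))
    PySem.Dict.empty).items

-- ===== PRECONDITION & SPEC =====
def Spec_merge_signal_lists (all_signals : List (List (String × List String))) (out : List (String × List String)) : Prop := out = merge_signal_lists_alt all_signals
instance (all_signals : List (List (String × List String))) (out : List (String × List String)) : Decidable (Spec_merge_signal_lists all_signals out) := by unfold Spec_merge_signal_lists; infer_instance

-- ===== CLAIM (what is proved, stated in full; the proofs are below) =====
def Claim_equal_merge_signal_lists : Prop := ∀ (all_signals : List (List (String × List String))), Dom_merge_signal_lists all_signals → Spec_merge_signal_lists all_signals (merge_signal_lists all_signals)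

-- ===== LEMMAS AND PROOFS =====

def pvKey (s : String) : String := PySem.Str.lower (PySem.Str.strip s)

theorem pvDropWhile_prefix_self {p : Char → Bool} {t u : List Char} (hu : u <+: t)
    (ht : List.dropWhile p t = t) : List.dropWhile p u = u := by
  cases u with
  | nil => simp
  | cons c cs =>
    obtain ⟨rest, rfl⟩ := hu
    rw [List.dropWhile_eq_self_iff] at ht
    have hc : ¬ p c = true := by simpa using ht (by simp)
    simp [hc]

theorem pvChars_strip_idem (l : List Char) :
    PySem.Chars.strip (PySem.Chars.strip l) = PySem.Chars.strip l := by
  unfold PySem.Chars.strip PySem.Chars.rstrip PySem.Chars.lstrip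
  set p := PySem.Chars.isspace
  set l1 := List.dropWhile p l with hl1
  have h1 : List.dropWhile p l1 = l1 := List.dropWhile_idempotent p l
  set r := (List.dropWhile p l1.reverse).reverse with hr
  have hpref : r <+: l1 := by
    have := List.reverse_prefix.mpr (List.dropWhile_suffix (l := l1.reverse) p)
    simpa [← hr] using this
  have h2 : List.dropWhile p r = r := pvDropWhile_prefix_self hpref h1
  rw [h2, hr, List.reverse_reverse, List.dropWhile_idempotent]

theorem pvStrip_idem (s : String) : PySem.Str.strip (PySem.Str.strip s) = PySem.Str.strip s := by
  show String.ofList (PySem.Chars.strip (PySem.Str.strip s).toList) = _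
  rw [PySem.Str.toList_strip, pvChars_strip_idem]
  rfl

theorem pvKey_strip (s : String) : pvKey (PySem.Str.strip s) = pvKey s := by
  simp [pvKey, pvStrip_idem]

def pvDStep (st : PySem.Set String × List String) (item : String) : PySem.Set String × List String :=
  if PySem.Set.contains st.1 (pvKey item) then st
  else (PySem.Set.add st.1 (pvKey item), st.2 ++ [PySem.Str.strip item])

def pvDState (raw : List String) : PySem.Set String × List String :=
  raw.foldl pvDStep (PySem.Set.empty, [])

theorem pvDedupCI_eq (raw : List String) : dedupCI raw = (pvDState raw).2 := rfl

theorem pvDState_seen_gen (raw : List String) (st : PySem.Set String × List String)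
    (h : st.1 = st.2.map pvKey) : (raw.foldl pvDStep st).1 = (raw.foldl pvDStep st).2.map pvKey := by
  induction raw generalizing st with
  | nil => exact h
  | cons item rest ih =>
    simp only [List.foldl_cons]
    apply ih
    unfold pvDStep
    split_ifs with hc
    · exact h
    · have hnm : pvKey item ∉ st.1 := by
        intro hm; exact hc ((PySem.Set.contains_iff _ _).mpr hm)
      rw [PySem.Set.add_of_not_mem hnm, h]
      simp [pvKey_strip]

theorem pvDState_seen (raw : List String) : (pvDState raw).1 = (pvDState raw).2.map pvKey :=
  pvDState_seen_gen raw _ (by simp [PySem.Set.empty])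

def pvValMap (d : PySem.Dict String (List String)) : PySem.Dict String (List String) :=
  PySem.Dict.mk (d.items.map (fun p => (p.1, dedupCI p.2)))

theorem pvValMap_get? (d : PySem.Dict String (List String)) (k : String) :
    (pvValMap d).get? k = (d.get? k).map dedupCI := by
  obtain ⟨l⟩ := d
  induction l with
  | nil => rfl
  | cons p rest ih =>
    obtain ⟨c, w⟩ := p
    show (PySem.Dict.mk ((c, dedupCI w) :: _)).get? k = _
    rw [PySem.Dict.get?_mk_cons, PySem.Dict.get?_mk_cons]
    split_ifs with h
    · rfl
    · exact ih

theorem pvValMap_keys (d : PySem.Dict String (List String)) : (pvValMap d).keys = d.keys := by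
  show (d.items.map (fun p => (p.1, dedupCI p.2))).map (fun p => p.1) = d.items.map (fun p => p.1)
  simp

theorem pvValMap_contains (d : PySem.Dict String (List String)) (k : String) :
    (pvValMap d).contains k = d.contains k := by
  rw [PySem.Dict.contains_eq_isSome_get?, PySem.Dict.contains_eq_isSome_get?, pvValMap_get?]
  cases d.get? k <;> rfl

theorem pvValMap_insert (d : PySem.Dict String (List String)) (k : String) (w : List String) :
    (pvValMap d).insert k (dedupCI w) = pvValMap (d.insert k w) := by
  apply PySem.Dict.ext
  by_cases hc : d.contains k = true
  · rw [PySem.Dict.items_insert_of_contains _ _ ((pvValMap_contains d k).trans hc)]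
    show List.map _ (d.items.map _) = (d.insert k w).items.map _
    rw [PySem.Dict.items_insert_of_contains _ _ hc]
    simp only [List.map_map]
    apply List.map_congr_left
    intro p _
    by_cases hp : p.1 = k <;> simp [hp]
  · have hc' : d.contains k = false := by simpa using hc
    rw [PySem.Dict.items_insert_of_not_contains _ _ ((pvValMap_contains d k).trans hc')]
    show (d.items.map _) ++ _ = (d.insert k w).items.map _
    rw [PySem.Dict.items_insert_of_not_contains _ _ hc']
    simp

theorem pvInsert_same (d : PySem.Dict String (List String)) {k : String} {v : List String}
    (hnd : d.keys.Nodup) (h : d.get? k = some v) : d.insert k v = d := by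
  apply PySem.Dict.ext
  have hcont : d.contains k = true := by rw [PySem.Dict.contains_eq_isSome_get?, h]; rfl
  rw [PySem.Dict.items_insert_of_contains _ _ hcont]
  rw [List.map_eq_iff]
  intro i
  rcases hgi : d.items[i]? with _ | p
  · simp
  · have hp : p ∈ d.items := List.mem_of_getElem? hgi
    simp only [Option.map_some]
    have hpv : (if (p.1 == k) = true then (k, v) else p) = p := by
      obtain ⟨p1, p2⟩ := p
      by_cases hpk : p1 = k
      · have h2 : d.get? p1 = some p2 := PySem.Dict.get?_of_mem_items d hp hnd
        rw [hpk, h] at h2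
        have h3 : p2 = v := by injection h2.symm
        simp [hpk, h3]
      · simp [hpk]
    rw [hpv]

theorem pvAny_iff (raw : List String) (item : String) :
    ((dedupCI raw).any (fun e => pvKey e == pvKey item)) = PySem.Set.contains (pvDState raw).1 (pvKey item) := by
  rw [pvDedupCI_eq]
  rcases h : PySem.Set.contains (pvDState raw).1 (pvKey item) with _ | _
  · rw [List.any_eq_false]
    intro e he hbe
    have : pvKey item ∈ (pvDState raw).1 := by
      rw [pvDState_seen]
      exact List.mem_map.mpr ⟨e, he, by simpa using hbe⟩
    rw [(PySem.Set.contains_iff _ _).mpr this] at h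
    exact Bool.false_ne_true h.symm
  · rw [List.any_eq_true]
    have : pvKey item ∈ (pvDState raw).1 := (PySem.Set.contains_iff _ _).mp h
    rw [pvDState_seen] at this
    obtain ⟨e, he, hk⟩ := List.mem_map.mp this
    exact ⟨e, he, by simp [hk]⟩

theorem pvInner (cat : String) (items : List String) (merged : PySem.Dict String (List String))
    (raw : List String) (hnd : merged.keys.Nodup) (h : merged.get? cat = some (dedupCI raw)) :
    items.foldl
      (fun (merged : PySem.Dict String (List String)) item =>
        let item_lower := PySem.Str.lower (PySem.Str.strip item)
        if (merged.getD cat []).any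
            (fun existing => PySem.Str.lower (PySem.Str.strip existing) == item_lower) then
          merged
        else
          merged.insert cat (merged.getD cat [] ++ [PySem.Str.strip item]))
      merged
    = merged.insert cat (dedupCI (raw ++ items)) := by
  induction items generalizing merged raw with
  | nil =>
    simp only [List.foldl_nil, List.append_nil]
    exact (pvInsert_same merged hnd h).symm
  | cons item rest ih =>
    have hgetD : merged.getD cat [] = dedupCI raw := PySem.Dict.getD_of_get?_eq_some merged [] h
    have hstep : pvDState (raw ++ [item]) = pvDStep (pvDState raw) item := by
      unfold pvDState
      rw [List.foldl_append]
      rfl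
    simp only [List.foldl_cons, hgetD]
    rw [show (fun existing => PySem.Str.lower (PySem.Str.strip existing) == PySem.Str.lower (PySem.Str.strip item)) = (fun e => pvKey e == pvKey item) from rfl]
    rw [pvAny_iff]
    rcases hc : PySem.Set.contains (pvDState raw).1 (pvKey item) with _ | _
    · -- new key: append
      rw [if_neg (by simp)]
      have hd : dedupCI (raw ++ [item]) = dedupCI raw ++ [PySem.Str.strip item] := by
        rw [pvDedupCI_eq, hstep]
        unfold pvDStep
        rw [hc]
        simp [pvDedupCI_eq]
      have := ih (merged.insert cat (dedupCI raw ++ [PySem.Str.strip item])) (raw ++ [item])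
        (PySem.Dict.nodup_keys_insert merged cat _ hnd)
        (by rw [PySem.Dict.get?_insert_self, hd])
      rw [show (raw ++ [item]) ++ rest = raw ++ item :: rest by simp] at this
      rw [this, PySem.Dict.insert_insert_self]
    · -- duplicate key: skip
      rw [if_pos rfl]
      have hd : dedupCI (raw ++ [item]) = dedupCI raw := by
        rw [pvDedupCI_eq, hstep]
        unfold pvDStep
        rw [hc]
        simp [pvDedupCI_eq]
      have := ih merged (raw ++ [item]) hnd (by rw [h, hd])
      rw [show (raw ++ [item]) ++ rest = raw ++ item :: rest by simp] at this
      exact this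


theorem pvBstep_nodup (agg : PySem.Dict String (List String)) (p : String × List String)
    (h : agg.keys.Nodup) :
    (if p.1 ∈ LORE_CATEGORIES then agg.insert p.1 (agg.getD p.1 [] ++ p.2) else agg).keys.Nodup := by
  split_ifs
  · exact PySem.Dict.nodup_keys_insert agg p.1 _ h
  · exact h

theorem pvPairStep (agg : PySem.Dict String (List String)) (hnd : agg.keys.Nodup)
    (p : String × List String) :
    (if p.1 ∈ LORE_CATEGORIES then
      let m := if (pvValMap agg).contains p.1 then pvValMap agg else (pvValMap agg).insert p.1 []
      p.2.foldl
        (fun (merged : PySem.Dict String (List String)) item =>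
          let item_lower := PySem.Str.lower (PySem.Str.strip item)
          if (merged.getD p.1 []).any
              (fun existing => PySem.Str.lower (PySem.Str.strip existing) == item_lower) then
            merged
          else
            merged.insert p.1 (merged.getD p.1 [] ++ [PySem.Str.strip item]))
        m
    else pvValMap agg)
    = pvValMap (if p.1 ∈ LORE_CATEGORIES then agg.insert p.1 (agg.getD p.1 [] ++ p.2) else agg) := by
  have hndv : (pvValMap agg).keys.Nodup := by rw [pvValMap_keys]; exact hnd
  by_cases hin : p.1 ∈ LORE_CATEGORIES
  · rw [if_pos hin, if_pos hin]
    by_cases hc : agg.contains p.1 = true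
    · have hvc : (pvValMap agg).contains p.1 = true := by rw [pvValMap_contains]; exact hc
      simp only [hvc, if_true]
      rw [PySem.Dict.contains_eq_isSome_get?] at hc
      obtain ⟨raw0, hraw0⟩ := Option.isSome_iff_exists.mp hc
      have hgd : agg.getD p.1 [] = raw0 := PySem.Dict.getD_of_get?_eq_some agg [] hraw0
      have hget : (pvValMap agg).get? p.1 = some (dedupCI raw0) := by
        rw [pvValMap_get?, hraw0]; rfl
      rw [pvInner p.1 p.2 (pvValMap agg) raw0 hndv hget, hgd, pvValMap_insert]
    · have hc' : agg.contains p.1 = false := by simpa using hc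
      have hvc : (pvValMap agg).contains p.1 = false := by rw [pvValMap_contains]; exact hc'
      simp only [hvc, Bool.false_eq_true, if_false]
      have hget : ((pvValMap agg).insert p.1 []).get? p.1 = some (dedupCI []) :=
        PySem.Dict.get?_insert_self (pvValMap agg) p.1 []
      rw [pvInner p.1 p.2 ((pvValMap agg).insert p.1 []) []
            (PySem.Dict.nodup_keys_insert _ p.1 [] hndv) hget]
      rw [show dedupCI [] = ([] : List String) from rfl] at *
      rw [PySem.Dict.insert_insert_self, PySem.Dict.getD_of_not_contains agg [] hc']
      rw [show dedupCI ([] ++ p.2) = dedupCI p.2 by simp]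
      rw [pvValMap_insert]
      simp
  · rw [if_neg hin, if_neg hin]

theorem pvChunk (signals : List (String × List String)) (agg : PySem.Dict String (List String))
    (hnd : agg.keys.Nodup) :
    signals.foldl
      (fun (merged : PySem.Dict String (List String)) p =>
        if p.1 ∈ LORE_CATEGORIES then
          let merged := if merged.contains p.1 then merged else merged.insert p.1 []
          p.2.foldl
            (fun (merged : PySem.Dict String (List String)) item =>
              let item_lower := PySem.Str.lower (PySem.Str.strip item)
              if (merged.getD p.1 []).any
                  (fun existing => PySem.Str.lower (PySem.Str.strip existing) == item_lower) then
                merged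
              else
                merged.insert p.1 (merged.getD p.1 [] ++ [PySem.Str.strip item]))
            merged
        else merged)
      (pvValMap agg)
    = pvValMap (signals.foldl
        (fun (agg : PySem.Dict String (List String)) p =>
          if p.1 ∈ LORE_CATEGORIES then agg.insert p.1 (agg.getD p.1 [] ++ p.2) else agg)
        agg) := by
  induction signals generalizing agg with
  | nil => rfl
  | cons p rest ih =>
    simp only [List.foldl_cons]
    rw [pvPairStep agg hnd p]
    exact ih _ (pvBstep_nodup agg p hnd)

theorem pvOuter (sigs : List (List (String × List String))) (agg : PySem.Dict String (List String))
    (hnd : agg.keys.Nodup) :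
    sigs.foldl
      (fun (merged : PySem.Dict String (List String)) signals =>
        signals.foldl
          (fun (merged : PySem.Dict String (List String)) p =>
            if p.1 ∈ LORE_CATEGORIES then
              let merged := if merged.contains p.1 then merged else merged.insert p.1 []
              p.2.foldl
                (fun (merged : PySem.Dict String (List String)) item =>
                  let item_lower := PySem.Str.lower (PySem.Str.strip item)
                  if (merged.getD p.1 []).any
                      (fun existing => PySem.Str.lower (PySem.Str.strip existing) == item_lower) then
                    merged
                  else
                    merged.insert p.1 (merged.getD p.1 [] ++ [PySem.Str.strip item]))
                merged
            else merged)
          merged)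
      (pvValMap agg)
    = pvValMap (sigs.foldl
        (fun agg signals =>
          signals.foldl
            (fun (agg : PySem.Dict String (List String)) p =>
              if p.1 ∈ LORE_CATEGORIES then agg.insert p.1 (agg.getD p.1 [] ++ p.2) else agg)
            agg)
        agg) := by
  induction sigs generalizing agg with
  | nil => rfl
  | cons signals rest ih =>
    simp only [List.foldl_cons]
    rw [pvChunk signals agg hnd]
    apply ih
    induction signals generalizing agg with
    | nil => exact hnd
    | cons p ps ih2 =>
      simp only [List.foldl_cons]
      exact ih2 _ (pvBstep_nodup agg p hnd)

theorem pvChunk_nodup (signals : List (String × List String)) (agg : PySem.Dict String (List String))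
    (hnd : agg.keys.Nodup) :
    (signals.foldl
      (fun (agg : PySem.Dict String (List String)) p =>
        if p.1 ∈ LORE_CATEGORIES then agg.insert p.1 (agg.getD p.1 [] ++ p.2) else agg)
      agg).keys.Nodup := by
  induction signals generalizing agg with
  | nil => exact hnd
  | cons p ps ih => exact ih _ (pvBstep_nodup agg p hnd)

def pvBAgg (sigs : List (List (String × List String))) : PySem.Dict String (List String) :=
  sigs.foldl
    (fun agg signals =>
      signals.foldl
        (fun (agg : PySem.Dict String (List String)) p =>
          if p.1 ∈ LORE_CATEGORIES then agg.insert p.1 (agg.getD p.1 [] ++ p.2) else agg)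
        agg)
    PySem.Dict.empty

theorem pvAgg_nodup (sigs : List (List (String × List String))) :
    (pvBAgg sigs).keys.Nodup := by
  unfold pvBAgg
  have : ∀ (agg : PySem.Dict String (List String)), agg.keys.Nodup →
      (sigs.foldl
        (fun agg signals =>
          signals.foldl
            (fun (agg : PySem.Dict String (List String)) p =>
              if p.1 ∈ LORE_CATEGORIES then agg.insert p.1 (agg.getD p.1 [] ++ p.2) else agg)
            agg)
        agg).keys.Nodup := by
    induction sigs with
    | nil => intro agg h; exact h
    | cons s rest ih =>
      intro agg h
      simp only [List.foldl_cons]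
      exact ih _ (pvChunk_nodup s agg h)
  exact this PySem.Dict.empty (by simp [PySem.Dict.empty])

-- ===== VERDICT (by name: the statement is the Claim_ definition above) =====
theorem merge_signal_lists_spec : Claim_equal_merge_signal_lists := by
  intro all_signals _
  show merge_signal_lists all_signals = merge_signal_lists_alt all_signals
  have hnd : (pvBAgg all_signals).keys.Nodup := pvAgg_nodup all_signals
  have h := pvOuter all_signals PySem.Dict.empty (by simp [PySem.Dict.empty])
  have hA : merge_signal_lists all_signals = (pvValMap (pvBAgg all_signals)).items := by
    unfold merge_signal_lists
    rw [show (PySem.Dict.empty : PySem.Dict String (List String)) = pvValMap PySem.Dict.empty from rfl]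
    rw [h]
    rfl
  have hB : merge_signal_lists_alt all_signals
      = ((pvBAgg all_signals).items.foldl
          (fun (result : PySem.Dict String (List String)) p => result.insert p.1 (dedupCI p.2))
          PySem.Dict.empty).items := rfl
  rw [hA, hB]
  rw [PySem.Dict.items_foldl_insert_fresh (pvBAgg all_signals).items (fun p => p.1)
        (fun p => dedupCI p.2) PySem.Dict.empty
        (fun a _ => by simp [PySem.Dict.contains_empty]) (by exact hnd)]
  simp [pvValMap, PySem.Dict.empty]
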